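-- pv_equiv track=rewrite | github.com/Loping151/EndUID | EndUID/end_bind/__init__.py | _parse_credential
-- ===== SOURCE A (Python) =====
-- def _parse_credential(text: str) -> tuple[str, str]:
--     raw = text.strip()
--     lower = raw.lower()
--     for prefix in ("cred=", "cred:", "token=", "token:"):
--         if lower.startswith(prefix):
--             return ("cred" if "cred" in prefix else "token", raw[len(prefix):])
--     if len(raw) == 32:
--         return "cred", raw
--     if len(raw) == 24:
--         return "token", raw
--     return "", raw
-- ===== SOURCE B (Python) =====
-- def _parse_credential(text: str) -> tuple[str, str]:
--     raw = text.strip()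
--     sep = next((i for i, ch in enumerate(raw) if ch in "=:"), None)
--     if sep is not None:
--         kw = raw[:sep].lower()
--         if kw in ("cred", "token"):
--             return kw, raw[sep + 1:]
--     if len(raw) == 32:
--         return "cred", raw
--     if len(raw) == 24:
--         return "token", raw
--     return "", raw
-- ===== Notes on version B (the rewrite author's own statement) =====
-- stated objective: alternative
-- what changed: B replaces A's four startswith probes over the prefix tuple by a single scan for the first '='/':' separator followed by one lowercased-keyword comparison, with the length fallback shared.
import Mathlib
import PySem

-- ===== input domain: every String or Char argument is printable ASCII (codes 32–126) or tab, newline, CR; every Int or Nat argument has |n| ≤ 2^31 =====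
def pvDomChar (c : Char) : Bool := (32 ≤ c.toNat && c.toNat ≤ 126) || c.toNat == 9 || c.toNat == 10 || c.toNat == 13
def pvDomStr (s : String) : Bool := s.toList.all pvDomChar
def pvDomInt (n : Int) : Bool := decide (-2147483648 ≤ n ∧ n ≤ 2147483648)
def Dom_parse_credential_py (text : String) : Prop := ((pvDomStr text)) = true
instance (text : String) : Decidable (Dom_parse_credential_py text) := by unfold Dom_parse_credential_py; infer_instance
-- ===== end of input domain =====

-- B replaces A's four startswith prefix probes by a single scan for the first '='/':' separator
-- followed by one keyword comparison (objective: alternative decomposition; same cost).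

-- ===== PORT A =====
-- the tuple ("cred=", "cred:", "token=", "token:") the Python for-loop iterates over
def pvPrefixes : List (List Char) := ["cred=".toList, "cred:".toList, "token=".toList, "token:".toList]

-- the for-loop: first matching prefix returns; falling off the loop returns none
def pvALoop (raw lower : List Char) : List (List Char) → Option (String × String)
  | [] => none
  | p :: ps =>
    if PySem.Chars.startswith lower p then
      some (if PySem.Chars.isIn "cred".toList p then "cred" else "token",
            String.mk (PySem.List.slice raw (some (p.length : Int)) none))
    else pvALoop raw lower ps

def parse_credential_py (text : String) : String × String :=
  let raw := PySem.Chars.strip text.toList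
  let lower := PySem.Chars.lower raw
  match pvALoop raw lower pvPrefixes with
  | some r => r
  | none =>
    if PySem.Chars.len raw = 32 then ("cred", String.mk raw)
    else if PySem.Chars.len raw = 24 then ("token", String.mk raw)
    else ("", String.mk raw)

-- ===== PORT B =====
-- the shared length-based fallback at the end of B
def pvBFallback (raw : List Char) : String × String :=
  if PySem.Chars.len raw = 32 then ("cred", String.mk raw)
  else if PySem.Chars.len raw = 24 then ("token", String.mk raw)
  else ("", String.mk raw)

def parse_credential_py_alt (text : String) : String × String :=
  let raw := PySem.Chars.strip text.toList
  -- next((i for i, ch in enumerate(raw) if ch in "=:"), None)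
  match List.findIdx? (fun ch => ch == '=' || ch == ':') raw with
  | some i =>
    let kw := PySem.Chars.lower (PySem.List.slice raw none (some (i : Int)))
    if kw = "cred".toList ∨ kw = "token".toList then
      (String.mk kw, String.mk (PySem.List.slice raw (some ((i : Int) + 1)) none))
    else pvBFallback raw
  | none => pvBFallback raw

-- ===== PRECONDITION & SPEC =====
def Spec_parse_credential_py (text : String) (out : String × String) : Prop := out = parse_credential_py_alt text
instance (text : String) (out : String × String) : Decidable (Spec_parse_credential_py text out) := by unfold Spec_parse_credential_py; infer_instance

-- ===== CLAIM (what is proved, stated in full; the proofs are below) =====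
def Claim_equal_parse_credential_py : Prop := ∀ (text : String), Dom_parse_credential_py text → Spec_parse_credential_py text (parse_credential_py text)

-- ===== LEMMAS AND PROOFS =====

-- lowercasing maps a character to '=' or ':' exactly when it already is that separator
lemma pv_lowerChar_sep_iff (c : Char) :
    (PySem.Chars.lowerChar c = '=' ∨ PySem.Chars.lowerChar c = ':') ↔ (c = '=' ∨ c = ':') := by
  unfold PySem.Chars.lowerChar
  split_ifs with h
  · have hb : 65 ≤ c.toNat ∧ c.toNat ≤ 90 := by
      simp [PySem.Chars.isupper, Char.le_def] at h
      exact h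
    obtain ⟨h1, h2⟩ := hb
    have hv : (Char.ofNat (c.toNat + 32)).toNat = c.toNat + 32 := by
      rw [Char.toNat_ofNat, if_pos]
      exact Or.inl (by omega)
    constructor
    · rintro (h' | h')
      · have := congrArg Char.toNat h'
        rw [hv, show ('=').toNat = 61 from rfl] at this
        omega
      · have := congrArg Char.toNat h'
        rw [hv, show (':').toNat = 58 from rfl] at this
        omega
    · rintro (h' | h') <;> subst h' <;> exact absurd h1 (by decide)
  · exact Iff.rfl

-- startswith on the lowercased string, as an equation about take
lemma pv_sw_eq (raw p : List Char) :
    PySem.Chars.startswith (PySem.Chars.lower raw) p = true ↔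
      (raw.map PySem.Chars.lowerChar).take p.length = p := by
  rw [PySem.Chars.startswith_iff, List.prefix_iff_eq_take]
  simp [PySem.Chars.lower]
  exact eq_comm

lemma pv_map_take_succ {f : Char → Char} {l : List Char} {n : Nat} (h : n < l.length) :
    (l.map f).take (n + 1) = (l.take n).map f ++ [f (l[n]'h)] := by
  simp [List.take_succ, List.map_take, h]

-- a matching keyword+separator prefix pins down the first separator position and the keyword
lemma pv_sw_elim (raw k : List Char) (s : Char)
    (hs : s = '=' ∨ s = ':')
    (hl : ∀ (j : Nat) (hj : j < k.length), k[j] ≠ '=' ∧ k[j] ≠ ':')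
    (hsw : (raw.map PySem.Chars.lowerChar).take (k.length + 1) = k ++ [s]) :
    List.findIdx? (fun ch => ch == '=' || ch == ':') raw = some k.length ∧
    PySem.Chars.lower (raw.take k.length) = k := by
  have hlen : k.length + 1 ≤ raw.length := by
    have := congrArg List.length hsw
    simp at this
    omega
  have helem : ∀ (j : Nat) (hj : j < k.length + 1),
      PySem.Chars.lowerChar (raw[j]'(by omega)) = (k ++ [s])[j]'(by simp; omega) := by
    intro j hj
    have h1 : ((raw.map PySem.Chars.lowerChar).take (k.length + 1))[j]'(by simp; omega)
        = (k ++ [s])[j]'(by simp; omega) := List.getElem_of_eq hsw _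
    simpa using h1
  have hsep : raw[k.length]'(by omega) = '=' ∨ raw[k.length]'(by omega) = ':' := by
    apply (pv_lowerChar_sep_iff _).mp
    have := helem k.length (by omega)
    rw [this]
    simpa using hs
  refine ⟨List.findIdx?_eq_some_iff_getElem.mpr ⟨by omega, ?_, ?_⟩, ?_⟩
  · rcases hsep with h | h <;> simp [h]
  · intro j hj
    have hj' : j < k.length + 1 := by omega
    have he := helem j hj'
    rw [List.getElem_append_left hj] at he
    simp only [Bool.or_eq_true, beq_iff_eq, not_or]
    have hnot : ¬ (raw[j]'(by omega) = '=' ∨ raw[j]'(by omega) = ':') := by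
      intro hcon
      have : PySem.Chars.lowerChar (raw[j]'(by omega)) = '=' ∨
             PySem.Chars.lowerChar (raw[j]'(by omega)) = ':' := by
        rcases hcon with h | h <;> rw [h] <;> [left; right] <;> decide
      rw [he] at this
      rcases this with h | h
      · exact (hl j hj).1 h
      · exact (hl j hj).2 h
    push_neg at hnot
    simpa using hnot
  · have : PySem.Chars.lower (raw.take k.length)
        = ((raw.map PySem.Chars.lowerChar).take (k.length + 1)).take k.length := by
      simp [PySem.Chars.lower, List.map_take, List.take_take]
    rw [this, hsw]
    simp
-- converse: a keyword before position k.length lifts to a take-equation on the lowercased list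
lemma pv_sw_intro (raw k : List Char) (n : Nat) (hn : k.length = n) (hlt : n < raw.length)
    (hk : PySem.Chars.lower (raw.take n) = k) :
    (raw.map PySem.Chars.lowerChar).take (n + 1)
      = k ++ [PySem.Chars.lowerChar (raw[n]'hlt)] := by
  subst hn
  rw [pv_map_take_succ hlt]
  simp only [PySem.Chars.lower] at hk
  rw [hk]

-- the two programs agree on the stripped character list
lemma pv_core (raw : List Char) :
    (match pvALoop raw (PySem.Chars.lower raw) pvPrefixes with
     | some r => r
     | none =>
       if PySem.Chars.len raw = 32 then (("cred" : String), String.mk raw)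
       else if PySem.Chars.len raw = 24 then ("token", String.mk raw)
       else ("", String.mk raw))
    = (match List.findIdx? (fun ch => ch == '=' || ch == ':') raw with
       | some i =>
         let kw := PySem.Chars.lower (PySem.List.slice raw none (some (i : Int)))
         if kw = "cred".toList ∨ kw = "token".toList then
           (String.mk kw, String.mk (PySem.List.slice raw (some ((i : Int) + 1)) none))
         else pvBFallback raw
       | none => pvBFallback raw) := by
  rcases hf : List.findIdx? (fun ch => ch == '=' || ch == ':') raw with _ | i
  · -- no separator anywhere: every keyword+separator prefix fails on both sides
    have hno : ∀ (k : List Char) (s : Char), (s = '=' ∨ s = ':') →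
        (∀ (j : Nat) (hj : j < k.length), k[j] ≠ '=' ∧ k[j] ≠ ':') →
        PySem.Chars.startswith (PySem.Chars.lower raw) (k ++ [s]) = false := by
      intro k s hs hl
      cases hb : PySem.Chars.startswith (PySem.Chars.lower raw) (k ++ [s])
      · rfl
      · exfalso
        have hsw := (pv_sw_eq raw (k ++ [s])).mp hb
        simp only [List.length_append, List.length_cons, List.length_nil] at hsw
        have := (pv_sw_elim raw k s hs hl hsw).1
        rw [hf] at this
        simp at this
    have c1 := hno "cred".toList '=' (Or.inl rfl) (by decide)
    have c2 := hno "cred".toList ':' (Or.inr rfl) (by decide)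
    have c3 := hno "token".toList '=' (Or.inl rfl) (by decide)
    have c4 := hno "token".toList ':' (Or.inr rfl) (by decide)
    simp only [pvALoop, pvPrefixes, pvBFallback,
      show ("cred=".toList : List Char) = "cred".toList ++ ['='] from rfl,
      show ("cred:".toList : List Char) = "cred".toList ++ [':'] from rfl,
      show ("token=".toList : List Char) = "token".toList ++ ['='] from rfl,
      show ("token:".toList : List Char) = "token".toList ++ [':'] from rfl,
      c1, c2, c3, c4, Bool.false_eq_true, if_false]
  · obtain ⟨hi, hpi, hmin⟩ := List.findIdx?_eq_some_iff_getElem.mp hf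
    -- if some keyword+separator prefix matched, its keyword would sit before position i
    have hnoX : ∀ (k : List Char) (s : Char), (s = '=' ∨ s = ':') →
        (∀ (j : Nat) (hj : j < k.length), k[j] ≠ '=' ∧ k[j] ≠ ':') →
        ¬ (PySem.Chars.lower (raw.take i) = k) →
        PySem.Chars.startswith (PySem.Chars.lower raw) (k ++ [s]) = false := by
      intro k s hs hl hk
      cases hb : PySem.Chars.startswith (PySem.Chars.lower raw) (k ++ [s])
      · rfl
      · exfalso
        have hsw := (pv_sw_eq raw (k ++ [s])).mp hb
        simp only [List.length_append, List.length_cons, List.length_nil] at hsw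
        obtain ⟨hfi, hkk⟩ := pv_sw_elim raw k s hs hl hsw
        rw [hf] at hfi
        have : i = k.length := by injection hfi
        subst this
        exact hk hkk
    have hslice : PySem.List.slice raw none (some (i : Int)) = raw.take i := by
      rw [PySem.List.slice_to raw (by positivity)]
      simp
    have hdrop : PySem.List.slice raw (some ((i : Int) + 1)) none = raw.drop (i + 1) := by
      rw [PySem.List.slice_from raw (by positivity)]
      norm_num
    by_cases hc : PySem.Chars.lower (raw.take i) = "cred".toList
    · have hi4 : i = 4 := by
        have := congrArg List.length hc
        simp [PySem.Chars.lower] at this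
        omega
      subst hi4
      have h4 : raw[4] = '=' ∨ raw[4] = ':' := by simpa using hpi
      have hswc := pv_sw_intro raw "cred".toList 4 (by decide) hi hc
      rcases h4 with h4 | h4
      · have hswe : PySem.Chars.startswith (PySem.Chars.lower raw) "cred=".toList = true := by
          rw [pv_sw_eq, show ("cred=".toList).length = 5 from by decide, hswc, h4]
          decide
        simp only [pvALoop, pvPrefixes, hswe, if_true, hslice, hdrop, hc]
        norm_num
        constructor
        · decide
        · rw [show "cred=".length = 5 from by decide]
      · have hswe2 : PySem.Chars.startswith (PySem.Chars.lower raw) "cred:".toList = true := by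
          rw [pv_sw_eq, show ("cred:".toList).length = 5 from by decide, hswc, h4]
          decide
        have hswe1 : PySem.Chars.startswith (PySem.Chars.lower raw) "cred=".toList = false := by
          cases hb : PySem.Chars.startswith (PySem.Chars.lower raw) "cred=".toList
          · rfl
          · exfalso
            have h1 := (pv_sw_eq raw "cred=".toList).mp hb
            have h2 := (pv_sw_eq raw "cred:".toList).mp hswe2
            simp only [show ("cred=".toList).length = 5 from rfl,
                       show ("cred:".toList).length = 5 from rfl] at h1 h2
            rw [h1] at h2
            exact absurd h2 (by decide)
        simp only [pvALoop, pvPrefixes, hswe1, hswe2, Bool.false_eq_true, if_false, if_true,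
          hslice, hdrop, hc]
        norm_num
        constructor
        · decide
        · rw [show "cred:".length = 5 from by decide]
    · by_cases ht : PySem.Chars.lower (raw.take i) = "token".toList
      · have hi5 : i = 5 := by
          have := congrArg List.length ht
          simp [PySem.Chars.lower] at this
          omega
        subst hi5
        have h5 : raw[5] = '=' ∨ raw[5] = ':' := by simpa using hpi
        have hswc := pv_sw_intro raw "token".toList 5 (by decide) hi ht
        have f1 := hnoX "cred".toList '=' (Or.inl rfl) (by decide) hc
        have f2 := hnoX "cred".toList ':' (Or.inr rfl) (by decide) hc
        rcases h5 with h5 | h5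
        · have hswe : PySem.Chars.startswith (PySem.Chars.lower raw) "token=".toList = true := by
            rw [pv_sw_eq, show ("token=".toList).length = 6 from by decide, hswc, h5]
            decide
          simp only [pvALoop, pvPrefixes,
            show ("cred=".toList : List Char) = "cred".toList ++ ['='] from rfl,
            show ("cred:".toList : List Char) = "cred".toList ++ [':'] from rfl,
            f1, f2, hswe, Bool.false_eq_true, if_false, if_true, hslice, hdrop, ht]
          norm_num
          constructor
          · decide
          · rw [show "token=".length = 6 from by decide]
        · have hswe2 : PySem.Chars.startswith (PySem.Chars.lower raw) "token:".toList = true := by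
            rw [pv_sw_eq, show ("token:".toList).length = 6 from by decide, hswc, h5]
            decide
          have hswe1 : PySem.Chars.startswith (PySem.Chars.lower raw) "token=".toList = false := by
            cases hb : PySem.Chars.startswith (PySem.Chars.lower raw) "token=".toList
            · rfl
            · exfalso
              have h1 := (pv_sw_eq raw "token=".toList).mp hb
              have h2 := (pv_sw_eq raw "token:".toList).mp hswe2
              simp only [show ("token=".toList).length = 6 from rfl,
                         show ("token:".toList).length = 6 from rfl] at h1 h2
              rw [h1] at h2
              exact absurd h2 (by decide)
          simp only [pvALoop, pvPrefixes,
            show ("cred=".toList : List Char) = "cred".toList ++ ['='] from rfl,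
            show ("cred:".toList : List Char) = "cred".toList ++ [':'] from rfl,
            f1, f2, hswe1, hswe2, Bool.false_eq_true, if_false, if_true, hslice, hdrop, ht]
          norm_num
          constructor
          · decide
          · rw [show "token:".length = 6 from by decide]
      · have f1 := hnoX "cred".toList '=' (Or.inl rfl) (by decide) hc
        have f2 := hnoX "cred".toList ':' (Or.inr rfl) (by decide) hc
        have f3 := hnoX "token".toList '=' (Or.inl rfl) (by decide) ht
        have f4 := hnoX "token".toList ':' (Or.inr rfl) (by decide) ht
        simp only [pvALoop, pvPrefixes, pvBFallback,
          show ("cred=".toList : List Char) = "cred".toList ++ ['='] from rfl,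
          show ("cred:".toList : List Char) = "cred".toList ++ [':'] from rfl,
          show ("token=".toList : List Char) = "token".toList ++ ['='] from rfl,
          show ("token:".toList : List Char) = "token".toList ++ [':'] from rfl,
          f1, f2, f3, f4, Bool.false_eq_true, if_false, hslice, hc, ht]
        norm_num

-- ===== VERDICT (by name: the statement is the Claim_ definition above) =====
theorem parse_credential_py_spec : Claim_equal_parse_credential_py := by
  intro text _
  unfold Spec_parse_credential_py parse_credential_py parse_credential_py_alt
  exact pv_core (PySem.Chars.strip text.toList)
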